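-- pv_equiv track=rewrite | github.com/mbaum0/aoc2023 | day12/main.py | validate_combo
-- ===== SOURCE A (Python) =====
-- def validate_combo(spring, record):
--     last_group_size = 0
--     record_idx = 0
--     # get groups of broken springs
--     groups = []
--     for char in spring:
--         if char == '#':
--             last_group_size += 1
--         else:
--             if last_group_size > 0:
--                 groups.append(last_group_size)
--                 last_group_size = 0
--
--     if last_group_size > 0:
--         groups.append(last_group_size)
--
--
--     if len(groups) != len(record):
--         return False
--
--     for group in groups:
--         if group != record[record_idx]:
--             return False
--         record_idx += 1
--
--     return True
-- ===== SOURCE B (Python) =====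
-- def validate_combo(spring, record):
--     # Matcher driven by the record: for each expected group size, skip separators,
--     # then consume one run of '#' and check its length; finally no '#' may remain.
--     i, n = 0, len(spring)
--     for r in record:
--         while i < n and spring[i] != '#':
--             i += 1
--         j = i
--         while i < n and spring[i] == '#':
--             i += 1
--         if i == j or i - j != r:
--             return False
--     return '#' not in spring[i:]
-- ===== Notes on version B (the rewrite author's own statement) =====
-- stated objective: alternative
-- what changed: Instead of A's extract-then-compare (build the full list of '#'-run lengths, check lengths, then an indexed comparison loop), B is a record-driven matcher with a cursor: for each expected group it skips separators, consumes exactly one '#' run and checks its length on the spot with early exit, and finally checks no '#' remains; no groups list is ever built.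
import Mathlib
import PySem

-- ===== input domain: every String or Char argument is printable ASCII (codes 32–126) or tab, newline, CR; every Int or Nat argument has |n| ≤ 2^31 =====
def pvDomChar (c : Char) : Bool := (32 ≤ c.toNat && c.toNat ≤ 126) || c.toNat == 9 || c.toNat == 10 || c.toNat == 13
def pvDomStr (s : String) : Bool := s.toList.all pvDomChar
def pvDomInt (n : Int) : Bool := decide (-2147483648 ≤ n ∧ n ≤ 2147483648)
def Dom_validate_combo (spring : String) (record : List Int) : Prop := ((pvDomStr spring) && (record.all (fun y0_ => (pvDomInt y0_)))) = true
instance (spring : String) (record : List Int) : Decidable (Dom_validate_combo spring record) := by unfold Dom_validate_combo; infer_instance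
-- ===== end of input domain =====

-- B replaces A's extract-then-compare (build all '#'-run lengths, length check, indexed
-- comparison loop) by a record-driven matcher: for each expected group it skips
-- separators, consumes one '#' run and checks its length, never building a groups list
-- (objective: alternative).

-- ===== PORT A =====
-- one step of A's first for-loop; state = (last_group_size, groups)
def vcStep (st : Int × List Int) (c : Char) : Int × List Int :=
  if c == '#' then (st.1 + 1, st.2)
  else if st.1 > 0 then (0, st.2 ++ [st.1]) else st

-- A's second for-loop: compare groups against record[record_idx]; the none branch
-- (IndexError) is unreachable because A checked the lengths first
def vcCmp (groups : List Int) (record : List Int) (idx : Int) : Bool :=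
  match groups with
  | [] => true
  | g :: rest =>
    match PySem.List.pyGet? record idx with
    | some r => if g ≠ r then false else vcCmp rest record (idx + 1)
    | none => false

def validate_combo (spring : String) (record : List Int) : Bool :=
  let st := spring.toList.foldl vcStep (0, [])
  let groups := if st.1 > 0 then st.2 ++ [st.1] else st.2
  if groups.length ≠ record.length then false
  else vcCmp groups record 0

-- ===== PORT B =====
-- Source B's for-loop over record; the cursor i on spring[i:] is modelled by the remaining
-- character list: the two inner while-loops are the separator skip (dropWhile ≠ '#')
-- and the run consumption (takeWhile/dropWhile '#')
def vcMatch (record : List Int) (cs : List Char) : Bool :=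
  match record with
  | [] => !cs.contains '#'            -- return '#' not in spring[i:]
  | r :: rs =>
    let cs1 := cs.dropWhile (fun c => c != '#')
    let run := cs1.takeWhile (fun c => c == '#')
    if run.length = 0 ∨ (run.length : Int) ≠ r then false
    else vcMatch rs (cs1.drop run.length)

def validate_combo_alt (spring : String) (record : List Int) : Bool :=
  vcMatch record spring.toList

-- ===== PRECONDITION & SPEC =====
def Spec_validate_combo (spring : String) (record : List Int) (out : Bool) : Prop := out = validate_combo_alt spring record
instance (spring : String) (record : List Int) (out : Bool) : Decidable (Spec_validate_combo spring record out) := by unfold Spec_validate_combo; infer_instance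

-- ===== CLAIM (what is proved, stated in full; the proofs are below) =====
def Claim_equal_validate_combo : Prop := ∀ (spring : String) (record : List Int), Dom_validate_combo spring record → Spec_validate_combo spring record (validate_combo spring record)

-- ===== LEMMAS AND PROOFS =====

-- proof-side abstraction: the list of maximal '#'-run lengths
def vcRuns (cs : List Char) : List Int :=
  match cs with
  | [] => []
  | c :: rest =>
    if c == '#' then
      (((rest.takeWhile (· == '#')).length : Int) + 1) :: vcRuns (rest.dropWhile (· == '#'))
    else vcRuns rest
termination_by cs.length
decreasing_by
  · have := List.length_dropWhile_le (· == '#') rest; simp; omega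
  · simp

-- functional form of A's first loop together with its post-loop flush
def vcGr (k : Int) (cs : List Char) : List Int :=
  match cs with
  | [] => if k > 0 then [k] else []
  | c :: rest =>
    if c == '#' then vcGr (k + 1) rest
    else if k > 0 then k :: vcGr 0 rest else vcGr 0 rest

theorem vc_fold_eq (cs : List Char) : ∀ (k : Int) (acc : List Int), 0 ≤ k →
    (let st := cs.foldl vcStep (k, acc);
     if st.1 > 0 then st.2 ++ [st.1] else st.2) = acc ++ vcGr k cs := by
  induction cs with
  | nil =>
    intro k acc hk
    simp only [List.foldl, vcGr]
    split_ifs <;> simp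
  | cons c rest ih =>
    intro k acc hk
    simp only [List.foldl, vcStep, vcGr]
    by_cases hc : c == '#'
    · simp only [hc, if_pos]
      exact ih (k + 1) acc (by omega)
    · simp only [hc]
      by_cases hk0 : k > 0
      · simp only [hk0, if_pos, Bool.false_eq_true, ite_false]
        rw [ih 0 (acc ++ [k]) le_rfl]
        simp
      · have hkz : k = 0 := by omega
        simp only [Bool.false_eq_true, ite_false, hkz]
        exact ih 0 acc le_rfl

theorem vc_gr_eq_runs (n : Nat) : ∀ (cs : List Char), cs.length ≤ n → ∀ (k : Int), 0 ≤ k →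
    vcGr k cs = if k > 0 then (k + ((cs.takeWhile (· == '#')).length : Int)) :: vcRuns (cs.dropWhile (· == '#')) else vcRuns cs := by
  induction n with
  | zero =>
    intro cs hcs k hk
    have : cs = [] := List.eq_nil_of_length_eq_zero (by omega)
    subst this
    simp [vcGr, vcRuns]
  | succ m ih =>
    intro cs hcs k hk
    match cs with
    | [] => simp [vcGr, vcRuns]
    | c :: rest =>
      simp only [vcGr]
      by_cases hc : c == '#'
      · simp only [hc, if_pos]
        rw [ih rest (by simpa using Nat.lt_succ_iff.mp (Nat.lt_of_lt_of_le (Nat.lt_succ_self _) (by simpa using hcs))) (k + 1) (by omega)]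
        simp only [show k + 1 > 0 from by omega, if_pos]
        by_cases hk0 : k > 0
        · simp only [hk0, if_pos, List.takeWhile_cons, hc, List.dropWhile_cons, if_pos]
          congr 1
          simp only [List.length_cons]
          push_cast
          ring
        · have hkz : k = 0 := by omega
          subst hkz
          simp only [show ¬((0:Int) > 0) from by omega, ite_false]
          conv_rhs => rw [vcRuns]
          simp only [hc, if_pos]
          congr 1
          push_cast
          ring
      · simp only [hc, Bool.false_eq_true, ite_false]
        have hrest : rest.length ≤ m := by simpa using Nat.lt_succ_iff.mp (by simpa using hcs)
        rw [ih rest hrest 0 le_rfl]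
        simp only [show ¬((0:Int) > 0) from by omega, ite_false]
        have hruns : vcRuns (c :: rest) = vcRuns rest := by
          rw [vcRuns]; simp [hc]
        by_cases hk0 : k > 0
        · simp only [hk0, if_pos, List.takeWhile_cons, hc, List.dropWhile_cons]
          simp [hruns]
        · simp [hk0, hruns]

theorem vc_cmp_eq : ∀ (gs : List Int) (n : Nat) (full rs : List Int),
    full.drop n = rs → gs.length = rs.length → vcCmp gs full (n : Int) = decide (gs = rs) := by
  intro gs
  induction gs with
  | nil =>
    intro n full rs hdrop hlen
    have : rs = [] := List.eq_nil_of_length_eq_zero hlen.symm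
    subst this
    simp [vcCmp]
  | cons g gs' ih =>
    intro n full rs hdrop hlen
    match rs with
    | [] => simp at hlen
    | r :: rs' =>
      have hget : full[n]? = some r := by
        have h0 : (full.drop n)[0]? = full[n + 0]? := List.getElem?_drop
        rw [hdrop] at h0
        simpa using h0.symm
      rw [vcCmp]
      rw [PySem.List.pyGet?_natCast, hget]
      by_cases hgr : g = r
      · subst hgr
        simp only [ne_eq, not_true_eq_false, ite_false]
        have hdrop' : full.drop (n + 1) = rs' := by
          rw [← List.drop_drop]
          simp [hdrop]
        have : ((n : Int) + 1) = ((n + 1 : Nat) : Int) := by push_cast; ring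
        rw [this, ih (n + 1) full rs' hdrop' (by simpa using hlen)]
        simp
      · simp [hgr]

-- A computes decide (vcRuns = record)
theorem vc_A_eq (spring : String) (record : List Int) :
    validate_combo spring record = decide (vcRuns spring.toList = record) := by
  unfold validate_combo
  have hfold := vc_fold_eq spring.toList 0 [] le_rfl
  simp only [List.nil_append] at hfold
  have hgr := vc_gr_eq_runs spring.toList.length spring.toList le_rfl 0 le_rfl
  simp only [show ¬((0:Int) > 0) from by omega, ite_false] at hgr
  simp only [hfold, hgr]
  by_cases hlen : (vcRuns spring.toList).length = record.length
  · simp only [hlen, ne_eq, not_true_eq_false, ite_false]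
    exact vc_cmp_eq (vcRuns spring.toList) 0 record record (by simp) (by simpa using hlen)
  · simp only [ne_eq, hlen, not_false_eq_true, if_pos]
    have : vcRuns spring.toList ≠ record := fun h => hlen (by rw [h])
    simp [this]

-- skipping non-'#' characters does not change the runs
theorem vcRuns_dropWhile (cs : List Char) :
    vcRuns (cs.dropWhile (fun c => c != '#')) = vcRuns cs := by
  induction cs with
  | nil => simp
  | cons c rest ih =>
    by_cases hc : c = '#'
    · subst hc; simp
    · rw [List.dropWhile_cons]
      have h1 : (c != '#') = true := by simp [hc]
      rw [vcRuns]
      simp [h1, hc, ih]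

theorem vcRuns_nil_iff (cs : List Char) : vcRuns cs = [] ↔ cs.contains '#' = false := by
  induction cs with
  | nil => simp [vcRuns]
  | cons c rest ih =>
    by_cases hc : c = '#'
    · subst hc; rw [vcRuns]; simp
    · rw [vcRuns]; simp [hc, ih, Ne.symm hc]

-- B computes decide (vcRuns = record)
theorem vc_B_eq : ∀ (record : List Int) (cs : List Char),
    vcMatch record cs = decide (vcRuns cs = record) := by
  intro record
  induction record with
  | nil =>
    intro cs
    rw [vcMatch]
    rcases h : cs.contains '#' with _ | _
    · simp [(vcRuns_nil_iff cs).mpr h]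
    · have : vcRuns cs ≠ [] := fun hn => by
        have := (vcRuns_nil_iff cs).mp hn; rw [h] at this; exact absurd this (by decide)
      simp [this]
  | cons r rs ih =>
    intro cs
    rw [vcMatch]
    rw [← vcRuns_dropWhile cs]
    rcases hd : cs.dropWhile (fun c => c != '#') with _ | ⟨c, rest⟩
    · simp [vcRuns]
    · have hc : c = '#' := by
        have := List.head_dropWhile_not (fun c => c != '#') (l := cs)
        rw [hd] at this
        simpa using this (by simp)
      subst hc
      rw [List.takeWhile_cons]
      simp only [show (('#' : Char) == '#') = true from by decide, if_pos, List.length_cons]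
      have hne : ¬((rest.takeWhile (fun c => c == '#')).length + 1 = 0) := by omega
      rw [vcRuns]
      simp only [show (('#' : Char) == '#') = true from by decide, if_pos]
      by_cases hr : ((rest.takeWhile (fun c => c == '#')).length : Int) + 1 = r
      · have hcond : ¬((rest.takeWhile (fun c => c == '#')).length + 1 = 0 ∨
            (((rest.takeWhile (fun c => c == '#')).length + 1 : Nat) : Int) ≠ r) := by
          push_neg; exact ⟨hne, by push_cast; linarith⟩
        rw [if_neg hcond]
        have hdrop : (('#' :: rest).drop ((rest.takeWhile (fun c => c == '#')).length + 1))
            = rest.dropWhile (fun c => c == '#') := by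
          have hsplit : ('#' :: rest) = ('#' :: rest.takeWhile (fun c => c == '#')) ++ rest.dropWhile (fun c => c == '#') := by
            simp [List.takeWhile_append_dropWhile]
          conv_lhs => rw [hsplit]
          rw [show (rest.takeWhile (fun c => c == '#')).length + 1
              = ('#' :: rest.takeWhile (fun c => c == '#')).length from by simp]
          exact List.drop_left
        rw [hdrop, ih]
        have : (rest.takeWhile (· == '#')) = (rest.takeWhile (fun c => c == '#')) := rfl
        have h2 : (rest.dropWhile (· == '#')) = (rest.dropWhile (fun c => c == '#')) := rfl
        rw [this, h2]
        by_cases he : vcRuns (rest.dropWhile (fun c => c == '#')) = rs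
        · simp [he, hr]
        · simp [he]
      · have hcond : ((rest.takeWhile (fun c => c == '#')).length + 1 = 0 ∨
            (((rest.takeWhile (fun c => c == '#')).length + 1 : Nat) : Int) ≠ r) := by
          right; push_cast; intro h; exact hr (by linarith)
        rw [if_pos hcond]
        have : ((rest.takeWhile (· == '#')).length : Int) + 1 ≠ r := by
          simpa using hr
        simp [this]

-- ===== VERDICT (by name: the statement is the Claim_ definition above) =====
theorem validate_combo_spec : Claim_equal_validate_combo := by
  intro spring record _
  unfold Spec_validate_combo validate_combo_alt
  rw [vc_A_eq, vc_B_eq]
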